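-- pv_equiv track=rewrite | github.com/doomnonius/advent-of-code | 2024/day07.py | iterate2
-- ===== SOURCE A (Python) =====
-- from typing import List, Tuple, Set
--
-- def iterate2(total: int, ops: List[int], running: int, t = False) -> bool:
--     if running > total:
--         return False
--     elif running == total and not ops:
--         return True
--     elif len(ops) == 1:
--         return True in [total == running * ops[0], total == running + ops[0], total == running * (10 ** len(str(ops[0]))) + ops[0]]
--     else:
--         return True in [iterate2(total, ops[1:], running + ops[0], t), iterate2(total, ops[1:], running * ops[0], t), iterate2(total, ops[1:], running * (10 ** len(str(ops[0]))) + ops[0], t)]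
-- ===== SOURCE B (Python) =====
-- def iterate2(total, ops, running, t=False):
--     if running > total:
--         return False
--     if not ops:
--         return running == total
--     frontier = {running}
--     for op in ops[:-1]:
--         frontier = {c
--                     for v in frontier
--                     for c in (v + op, v * op, v * (10 ** len(str(op))) + op)
--                     if c <= total}
--     last = ops[-1]
--     shift = 10 ** len(str(last))
--     return any(total == v * last or total == v + last or total == v * shift + last
--                for v in frontier)
-- ===== Notes on version B (the rewrite author's own statement) =====
-- stated objective: alternative
-- what changed: Replaces A's threefold DFS recursion by an iterative level-synchronous search that keeps the set of distinct reachable running values (pruned to <= total) per position and checks the three final equations on the last operand.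
import Mathlib
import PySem

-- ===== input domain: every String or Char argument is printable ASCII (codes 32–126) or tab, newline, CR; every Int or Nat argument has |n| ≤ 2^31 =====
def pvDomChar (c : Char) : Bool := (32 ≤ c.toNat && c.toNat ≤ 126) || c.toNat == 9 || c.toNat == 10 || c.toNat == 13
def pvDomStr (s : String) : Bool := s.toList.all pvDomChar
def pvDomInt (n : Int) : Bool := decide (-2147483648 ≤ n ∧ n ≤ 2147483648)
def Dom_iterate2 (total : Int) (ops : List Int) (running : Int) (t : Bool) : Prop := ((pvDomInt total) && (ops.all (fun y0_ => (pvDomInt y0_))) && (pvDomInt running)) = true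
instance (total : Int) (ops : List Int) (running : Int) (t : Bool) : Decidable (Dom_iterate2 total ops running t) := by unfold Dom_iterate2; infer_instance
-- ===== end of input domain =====

-- B replaces A's threefold DFS recursion by an iterative level-set search over the distinct
-- reachable running values (alternative decomposition; return value proved equal on Pre_).

-- 10 ** len(str(n)), the concatenation shift used by both sources
def pvPow10len (n : Int) : Int := (10 : Int) ^ (PySem.Int.toChars n).length

-- ===== PORT A =====
def iterate2 (total : Int) (ops : List Int) (running : Int) (t : Bool) : Bool :=
  if running > total then false
  else if running = total ∧ ops = [] then true
  else
    match ops with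
    | [] => false  -- Python raises IndexError here (ops[0]); excluded by Pre_iterate2
    | [op] =>
        decide (total = running * op) || decide (total = running + op) ||
          decide (total = running * pvPow10len op + op)
    | op :: rest =>
        iterate2 total rest (running + op) t || iterate2 total rest (running * op) t ||
          iterate2 total rest (running * pvPow10len op + op) t

-- ===== PORT B =====
def iterate2_alt (total : Int) (ops : List Int) (running : Int) (t : Bool) : Bool :=
  if running > total then false
  else
    match ops with
    | [] => decide (running = total)
    | _ :: _ =>
      let frontier : PySem.Set Int :=
        ops.dropLast.foldl
          (fun S op => PySem.Set.ofList (S.flatMap (fun v =>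
            [v + op, v * op, v * pvPow10len op + op].filter (fun c => decide (c ≤ total)))))
          (PySem.Set.ofList [running])
      let last := ops.getLastD 0
      let shift := pvPow10len last
      frontier.any (fun v =>
        decide (total = v * last) || decide (total = v + last) || decide (total = v * shift + last))

-- ===== PRECONDITION & SPEC =====
-- Pre_ excludes ops = [] with running < total: there A falls through to ops[0] and raises IndexError.
def Pre_iterate2 (total : Int) (ops : List Int) (running : Int) (t : Bool) : Prop :=
  ops ≠ [] ∨ total ≤ running
instance (total : Int) (ops : List Int) (running : Int) (t : Bool) : Decidable (Pre_iterate2 total ops running t) := by unfold Pre_iterate2; infer_instance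
def pvWitness_iterate2 : Int × List Int × Int × Bool := (10, [2, 5], 0, false)

def Spec_iterate2 (total : Int) (ops : List Int) (running : Int) (t : Bool) (out : Bool) : Prop := out = iterate2_alt total ops running t
instance (total : Int) (ops : List Int) (running : Int) (t : Bool) (out : Bool) : Decidable (Spec_iterate2 total ops running t out) := by unfold Spec_iterate2; infer_instance

-- ===== CLAIM (what is proved, stated in full; the proofs are below) =====
def Claim_equal_iterate2 : Prop := ∀ (total : Int) (ops : List Int) (running : Int) (t : Bool), Dom_iterate2 total ops running t → Pre_iterate2 total ops running t → Spec_iterate2 total ops running t (iterate2 total ops running t)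



-- proof-side names for B's loop body and final test
def stepL (total op : Int) (F : List Int) : List Int :=
  F.flatMap (fun v => [v + op, v * op, v * pvPow10len op + op].filter (fun c => decide (c ≤ total)))

def finChk (total op v : Int) : Bool :=
  decide (total = v * op) || decide (total = v + op) || decide (total = v * pvPow10len op + op)

theorem any_congr_mem {l : List Int} {p q : Int → Bool} (h : ∀ x ∈ l, p x = q x) :
    l.any p = l.any q := by
  induction l with
  | nil => rfl
  | cons a l ih =>
      simp only [List.any_cons, h a (by simp), ih (fun x hx => h x (by simp [hx]))]

theorem any_mem_congr {l1 l2 : List Int} (p : Int → Bool) (h : ∀ x, x ∈ l1 ↔ x ∈ l2) :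
    l1.any p = l2.any p := by
  cases h1 : l1.any p <;> cases h2 : l2.any p <;> try rfl
  · rw [List.any_eq_true] at h2
    rcases h2 with ⟨x, hx, hp⟩
    rw [List.any_eq_false] at h1
    exact absurd hp (h1 x ((h x).mpr hx))
  · rw [List.any_eq_true] at h1
    rcases h1 with ⟨x, hx, hp⟩
    rw [List.any_eq_false] at h2
    exact absurd hp (h2 x ((h x).mp hx))

theorem any_flatMap (l : List Int) (f : Int → List Int) (p : Int → Bool) :
    (l.flatMap f).any p = l.any (fun a => (f a).any p) := by
  induction l with
  | nil => rfl
  | cons a l ih => simp [List.flatMap_cons, List.any_append, ih]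

theorem iterate2_gt {total op running : Int} {rest : List Int} {t : Bool}
    (h : total < running) : iterate2 total (op :: rest) running t = false := by
  cases rest <;> simp [iterate2, h]

theorem iterate2_single {total op v : Int} {t : Bool} (h : v ≤ total) :
    iterate2 total [op] v t = finChk total op v := by
  have h' : ¬ v > total := not_lt.mpr h
  simp [iterate2, finChk, h']

theorem any_filter_le (total : Int) (l : List Int) (g : Int → Bool)
    (hg : ∀ c, total < c → g c = false) :
    (l.filter (fun c => decide (c ≤ total))).any g = l.any g := by
  induction l with
  | nil => rfl
  | cons a l ih =>
      by_cases ha : a ≤ total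
      · simp [ha, List.any_cons, ih]
      · simp [ha, List.any_cons, ih, hg a (not_le.mp ha)]

theorem iterate2_step {total op v o2 : Int} {r : List Int} {t : Bool} (h : v ≤ total) :
    iterate2 total (op :: o2 :: r) v t
      = ([v + op, v * op, v * pvPow10len op + op].filter (fun c => decide (c ≤ total))).any
          (fun c => iterate2 total (o2 :: r) c t) := by
  have h' : ¬ v > total := not_lt.mpr h
  rw [any_filter_le total _ _ (fun c hc => iterate2_gt hc)]
  simp [iterate2, h', Bool.or_assoc]

theorem keyA (total : Int) (t : Bool) : ∀ (ops : List Int) (op : Int) (F : List Int),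
    (∀ v ∈ F, v ≤ total) →
    F.any (fun v => iterate2 total (op :: ops) v t)
      = ((op :: ops).dropLast.foldl (fun F o => stepL total o F) F).any
          (fun v => finChk total ((op :: ops).getLastD 0) v) := by
  intro ops
  induction ops with
  | nil =>
      intro op F hF
      show F.any (fun v => iterate2 total [op] v t) = F.any (fun v => finChk total op v)
      exact any_congr_mem (fun v hv => iterate2_single (hF v hv))
  | cons o2 r ih =>
      intro op F hF
      have hstep : F.any (fun v => iterate2 total (op :: o2 :: r) v t)
          = (stepL total op F).any (fun c => iterate2 total (o2 :: r) c t) := by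
        rw [stepL, any_flatMap]
        exact any_congr_mem (fun v hv => iterate2_step (hF v hv))
      have hF' : ∀ v ∈ stepL total op F, v ≤ total := by
        intro v hv
        rw [stepL] at hv
        simp only [List.mem_flatMap, List.mem_filter, decide_eq_true_eq] at hv
        rcases hv with ⟨w, _, _, hle⟩
        exact hle
      rw [hstep, ih o2 (stepL total op F) hF']
      simp only [List.getLastD_cons]
      rfl

theorem front_mem (total : Int) : ∀ (l : List Int) (S F : List Int),
    (∀ x, x ∈ S ↔ x ∈ F) → ∀ x,
    (x ∈ l.foldl (fun S op => PySem.Set.ofList (S.flatMap (fun v =>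
        [v + op, v * op, v * pvPow10len op + op].filter (fun c => decide (c ≤ total))))) S
      ↔ x ∈ l.foldl (fun F op => stepL total op F) F) := by
  intro l
  induction l with
  | nil => intro S F h x; exact h x
  | cons op l ih =>
      intro S F h x
      simp only [List.foldl_cons]
      refine ih _ _ (fun y => ?_) x
      rw [PySem.Set.mem_ofList, stepL]
      simp only [List.mem_flatMap]
      constructor
      · rintro ⟨v, hv, hy⟩; exact ⟨v, (h v).mp hv, hy⟩
      · rintro ⟨v, hv, hy⟩; exact ⟨v, (h v).mpr hv, hy⟩

theorem altB (total running op : Int) (rest : List Int) (t : Bool) (h : ¬ running > total) :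
    iterate2_alt total (op :: rest) running t
      = ((op :: rest).dropLast.foldl (fun S op => PySem.Set.ofList (S.flatMap (fun v =>
            [v + op, v * op, v * pvPow10len op + op].filter (fun c => decide (c ≤ total)))))
          (PySem.Set.ofList [running])).any
          (fun v => finChk total ((op :: rest).getLastD 0) v) := by
  unfold iterate2_alt finChk
  rw [if_neg h]

theorem iterate2_spec : Claim_equal_iterate2 := by
  intro total ops running t _ hPre
  unfold Spec_iterate2
  by_cases hgt : running > total
  · cases ops with
    | nil => simp [iterate2, iterate2_alt, hgt]
    | cons a l => rw [iterate2_gt hgt]; simp [iterate2_alt, hgt]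
  · have hle : running ≤ total := not_lt.mp hgt
    cases ops with
    | nil =>
        have heq : running = total := le_antisymm hle (by
          rcases hPre with h | h
          · exact absurd rfl h
          · exact h)
        simp [iterate2, iterate2_alt, heq]
    | cons op rest =>
        have h0 : iterate2 total (op :: rest) running t
            = [running].any (fun v => iterate2 total (op :: rest) v t) := by
          simp
        rw [h0, keyA total t rest op [running]
              (by intro v hv; simp only [List.mem_singleton] at hv; simpa [hv] using hle),
            altB total running op rest t hgt]
        exact (any_mem_congr _ (front_mem total (op :: rest).dropLast
          (PySem.Set.ofList [running]) [running]
          (by intro x; rw [PySem.Set.mem_ofList]))).symm
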